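-- pv_equiv track=rewrite | github.com/Marcin-Ramotowski/checkio-exercises | Storage/word_pattern.py | check_command
-- ===== SOURCE A (Python) =====
-- def check_command(pattern:int, command:str) -> bool:
--     binary = bin(pattern)[2:]
--     if len(binary) < len(command):
--         amount = len(command) - len(binary)
--         addition = '0' * amount
--         binary = addition + binary
--     string = ''
--     for char in command:
--         string += '1' if char.isalpha() else '0'
--     return binary == string
-- ===== SOURCE B (Python) =====
-- def check_command(pattern: int, command: str) -> bool:
--     expected = 0
--     for char in command:
--         expected = expected * 2 + (1 if char.isalpha() else 0)
--     return pattern == expected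
-- ===== Notes on version B (the rewrite author's own statement) =====
-- stated objective: simpler
-- what changed: B folds the command into one integer (expected = expected*2 + isalpha bit) and compares it to pattern, instead of building bin(pattern), left-padding it and building a second 0/1 string to compare.
-- intended difference: On pattern=0 with empty command A returns False only because bin(0) is '0' which never equals the empty bit string; B returns True, the intended value since the empty command trivially matches pattern 0. — e.g. on check_command(0, ""): A returns false, B returns true
import Mathlib
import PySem

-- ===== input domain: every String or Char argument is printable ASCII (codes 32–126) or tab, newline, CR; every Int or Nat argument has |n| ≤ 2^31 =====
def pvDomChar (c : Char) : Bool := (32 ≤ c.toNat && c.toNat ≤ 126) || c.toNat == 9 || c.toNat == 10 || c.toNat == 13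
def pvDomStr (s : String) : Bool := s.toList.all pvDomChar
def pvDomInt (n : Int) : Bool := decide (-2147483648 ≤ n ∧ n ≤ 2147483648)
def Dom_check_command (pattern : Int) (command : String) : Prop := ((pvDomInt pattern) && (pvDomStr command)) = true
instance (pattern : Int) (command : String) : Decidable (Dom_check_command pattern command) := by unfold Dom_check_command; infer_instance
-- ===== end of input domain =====

-- B replaces A's bin()/padding/second-string comparison by a single fold of the command into an
-- integer compared with pattern (simpler); on (0, "") A returns False by accident of bin(0)="0",
-- B returns the intended True (see D_check_command).


-- ===== PORT A =====
-- digits of bin(m) for m > 0 (most significant first); bin(0) handled at the call site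
def pvBinDigits (m : Nat) : List Char :=
  if m = 0 then [] else pvBinDigits (m / 2) ++ [if m % 2 = 1 then '1' else '0']

-- bin(pattern) is "0b"+digits for pattern ≥ 0 ("0b0" for 0) and "-0b"+digits for pattern < 0;
-- [2:] is PySem.List.slice with start 2 (exact)
def check_command (pattern : Int) (command : String) : Bool :=
  let digits : List Char := if pattern.natAbs = 0 then ['0'] else pvBinDigits pattern.natAbs
  let binFull : List Char :=
    if pattern < 0 then '-' :: '0' :: 'b' :: digits else '0' :: 'b' :: digits
  let binary := PySem.List.slice binFull (some 2) none
  let binary :=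
    if binary.length < command.toList.length then
      List.replicate (command.toList.length - binary.length) '0' ++ binary
    else binary
  let string := command.toList.foldl
    (fun s c => s ++ [if PySem.Chars.isalpha c then '1' else '0']) []
  binary == string

-- ===== PORT B =====
def check_command_alt (pattern : Int) (command : String) : Bool :=
  let expected := command.toList.foldl
    (fun e c => e * 2 + (if PySem.Chars.isalpha c then 1 else 0)) (0 : Int)
  pattern == expected

-- ===== PRECONDITION & SPEC =====
-- On pattern = 0 with empty command A returns False only because bin(0) is "0", which never equals
-- the empty bit string; B returns True, the intended value: the empty command trivially matches 0.
def D_check_command (pattern : Int) (command : String) : Prop := pattern = 0 ∧ command = ""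
instance (pattern : Int) (command : String) : Decidable (D_check_command pattern command) := by unfold D_check_command; infer_instance
def Spec_check_command (pattern : Int) (command : String) (out : Bool) : Prop := ¬ D_check_command pattern command → out = check_command_alt pattern command
instance (pattern : Int) (command : String) (out : Bool) : Decidable (Spec_check_command pattern command out) := by unfold Spec_check_command; infer_instance
def pvDiffWitness_check_command : Int × String := (0, "")
def pvDiffWitnessOut_check_command : Bool × Bool := (false, true)

-- ===== CLAIM (what is proved, stated in full; the proofs are below) =====
def Claim_unchanged_check_command : Prop := ∀ (pattern : Int) (command : String), Dom_check_command pattern command → Spec_check_command pattern command (check_command pattern command)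
def Claim_changed_check_command : Prop := Dom_check_command (pvDiffWitness_check_command.1) (pvDiffWitness_check_command.2) ∧ D_check_command (pvDiffWitness_check_command.1) (pvDiffWitness_check_command.2) ∧ check_command (pvDiffWitness_check_command.1) (pvDiffWitness_check_command.2) = pvDiffWitnessOut_check_command.1 ∧ check_command_alt (pvDiffWitness_check_command.1) (pvDiffWitness_check_command.2) = pvDiffWitnessOut_check_command.2 ∧ pvDiffWitnessOut_check_command.1 ≠ pvDiffWitnessOut_check_command.2
def Claim_exact_check_command : Prop := ∀ (pattern : Int) (command : String), Dom_check_command pattern command → D_check_command pattern command → check_command pattern command ≠ check_command_alt pattern command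

-- ===== LEMMAS AND PROOFS =====

-- value of a most-significant-first bit string
def pvVal (l : List Char) : Nat := l.foldl (fun a c => 2 * a + (if c = '1' then 1 else 0)) 0

def pvIsBit (c : Char) : Prop := c = '0' ∨ c = '1'

lemma pvVal_from (l : List Char) (a : Nat) :
    l.foldl (fun a c => 2 * a + (if c = '1' then 1 else 0)) a = a * 2 ^ l.length + pvVal l := by
  induction l generalizing a with
  | nil => simp [pvVal]
  | cons c t ih =>
    simp only [List.foldl_cons, List.length_cons, pvVal]
    rw [ih, ih (2 * 0 + _)]
    ring

lemma pvVal_lt (l : List Char) : pvVal l < 2 ^ l.length := by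
  induction l with
  | nil => simp [pvVal]
  | cons c t ih =>
    have hf := pvVal_from t (2 * 0 + (if c = '1' then 1 else 0))
    simp only [pvVal, List.foldl_cons, List.length_cons] at *
    rw [hf]
    have hb : (2 * 0 + (if c = '1' then 1 else 0)) ≤ 1 := by split <;> omega
    have hmul : (2 * 0 + (if c = '1' then 1 else 0)) * 2 ^ t.length ≤ 1 * 2 ^ t.length :=
      Nat.mul_le_mul_right _ hb
    have h2 : (2:Nat) ^ (t.length + 1) = 2 ^ t.length + 2 ^ t.length := by ring
    omega

lemma pvVal_inj (l₁ l₂ : List Char) (hlen : l₁.length = l₂.length)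
    (h₁ : ∀ c ∈ l₁, pvIsBit c) (h₂ : ∀ c ∈ l₂, pvIsBit c)
    (hv : pvVal l₁ = pvVal l₂) : l₁ = l₂ := by
  induction l₁ generalizing l₂ with
  | nil => cases l₂ <;> simp_all
  | cons c t ih =>
    cases l₂ with
    | nil => simp at hlen
    | cons d u =>
      simp only [List.length_cons] at hlen
      have hv₁ := pvVal_from t (2 * 0 + (if c = '1' then 1 else 0))
      have hv₂ := pvVal_from u (2 * 0 + (if d = '1' then 1 else 0))
      simp only [pvVal, List.foldl_cons] at hv
      rw [hv₁, hv₂] at hv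
      have hlt₁ := pvVal_lt t
      have hlt₂ := pvVal_lt u
      have hle : t.length = u.length := by omega
      rw [hle] at hv hlt₁
      have hc := h₁ c (by simp)
      have hd := h₂ d (by simp)
      have hbiteq : (if c = '1' then 1 else 0 : Nat) = (if d = '1' then 1 else 0) ∧
          pvVal t = pvVal u := by
        rcases Nat.lt_or_ge (if c = '1' then (1:Nat) else 0) (if d = '1' then 1 else 0) with h | h
        · exfalso; nlinarith [Nat.one_le_two_pow (n := u.length)]
        · rcases Nat.lt_or_ge (if d = '1' then (1:Nat) else 0) (if c = '1' then 1 else 0) with h' | h'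
          · exfalso; nlinarith [Nat.one_le_two_pow (n := u.length)]
          · constructor
            · omega
            · nlinarith [Nat.one_le_two_pow (n := u.length)]
      have hcd : c = d := by
        rcases hc with hc | hc <;> rcases hd with hd | hd <;> subst hc <;> subst hd <;>
          first | rfl | (exact absurd hbiteq.1 (by decide))
      subst hcd
      rw [ih u (by omega) (fun x hx => h₁ x (by simp [hx])) (fun x hx => h₂ x (by simp [hx]))
        hbiteq.2]

lemma pvBinDigits_val (m : Nat) : pvVal (pvBinDigits m) = m := by
  induction m using Nat.strong_induction_on with
  | _ m ih =>
    rw [pvBinDigits]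
    split
    · simp [pvVal]; omega
    · rename_i hm
      rw [pvVal, List.foldl_append, ← pvVal, pvBinDigits_val_aux, ih (m / 2) (by omega)]
      have := Nat.div_add_mod m 2
      rcases Nat.mod_two_eq_zero_or_one m with h | h <;> simp [h] <;> omega
where pvBinDigits_val_aux (a : Nat) (c : Char) :
    [c].foldl (fun a c => 2 * a + (if c = '1' then 1 else 0)) a
      = 2 * a + (if c = '1' then 1 else 0) := rfl

lemma pvBinDigits_bits (m : Nat) : ∀ c ∈ pvBinDigits m, pvIsBit c := by
  induction m using Nat.strong_induction_on with
  | _ m ih =>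
    rw [pvBinDigits]
    split
    · simp
    · intro c hc
      rcases List.mem_append.mp hc with h | h
      · exact ih (m / 2) (by omega) c h
      · simp only [List.mem_singleton] at h
        subst h; unfold pvIsBit; split <;> simp

lemma pvBinDigits_lt (m : Nat) : m < 2 ^ (pvBinDigits m).length := by
  induction m using Nat.strong_induction_on with
  | _ m ih =>
    rw [pvBinDigits]
    split
    · simp; omega
    · rename_i hm
      have := ih (m / 2) (by omega)
      simp only [List.length_append, List.length_singleton]
      have h2 : (2:Nat) ^ ((pvBinDigits (m / 2)).length + 1)
          = 2 ^ (pvBinDigits (m / 2)).length * 2 := by ring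
      omega

lemma pvBinDigits_ge (m : Nat) (hm : 0 < m) : 2 ^ ((pvBinDigits m).length - 1) ≤ m := by
  induction m using Nat.strong_induction_on with
  | _ m ih =>
    rw [pvBinDigits]
    rw [if_neg (by omega)]
    simp only [List.length_append, List.length_singleton]
    by_cases h2 : m / 2 = 0
    · simp [h2, pvBinDigits]; omega
    · have := ih (m / 2) (by omega) (by omega)
      have hlen : 0 < (pvBinDigits (m / 2)).length := by
        rw [pvBinDigits, if_neg h2]; simp
      have : 2 ^ ((pvBinDigits (m / 2)).length + 1 - 1)
          = 2 ^ ((pvBinDigits (m / 2)).length - 1) * 2 := by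
        rw [← pow_succ]; congr 1; omega
      omega

lemma pvVal_replicate_append (k : Nat) (l : List Char) :
    pvVal (List.replicate k '0' ++ l) = pvVal l := by
  have hz : pvVal (List.replicate k '0') = 0 := by
    induction k with
    | zero => rfl
    | succ n ihn =>
      simp only [List.replicate_succ, pvVal, List.foldl_cons]
      have h0 : (2 * 0 + (if '0' = '1' then 1 else 0) : Nat) = 0 := by decide
      rw [h0]
      exact ihn
  rw [pvVal, List.foldl_append,
    show List.foldl (fun a c => 2 * a + (if c = '1' then 1 else 0)) 0 (List.replicate k '0') = 0
      from hz]
  rfl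

-- B's Int fold equals the Nat value of the mapped bit string
lemma pvAlt_fold_eq (l : List Char) (a : Nat) :
    l.foldl (fun e c => e * 2 + (if PySem.Chars.isalpha c then 1 else 0)) (a : Int)
      = ((l.map (fun c => if PySem.Chars.isalpha c then '1' else '0')).foldl
          (fun a c => 2 * a + (if c = '1' then 1 else 0)) a : Nat) := by
  induction l generalizing a with
  | nil => simp
  | cons c t ih =>
    simp only [List.foldl_cons, List.map_cons]
    have : ((a : Int) * 2 + (if PySem.Chars.isalpha c then 1 else 0))
        = ((2 * a + (if (if PySem.Chars.isalpha c then '1' else '0') = '1' then 1 else 0) : Nat) : Int) := by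
      by_cases h : PySem.Chars.isalpha c <;> simp [h] <;> omega
    rw [this, ih]

lemma pvMap_bits (l : List Char) :
    ∀ c ∈ l.map (fun c => if PySem.Chars.isalpha c then '1' else '0'), pvIsBit c := by
  intro c hc
  rcases List.mem_map.mp hc with ⟨x, _, hx⟩
  subst hx; unfold pvIsBit; split <;> simp

-- ===== VERDICT (by name: the statement is the Claim_ definition above) =====
theorem check_command_spec : Claim_unchanged_check_command := by
  intro pattern command _ hnD
  unfold check_command check_command_alt
  dsimp only
  set cs := command.toList with hcs
  set S := cs.map (fun c => if PySem.Chars.isalpha c then '1' else '0') with hS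
  have hfold : cs.foldl (fun s c => s ++ [if PySem.Chars.isalpha c then '1' else '0']) [] = S := by
    simpa using PySem.List.foldl_append_singleton_eq_map
      (f := fun c => if PySem.Chars.isalpha c then '1' else '0') (l := cs) (acc := [])
  have hSlen : S.length = cs.length := List.length_map ..
  have hE : cs.foldl (fun e c => e * 2 + (if PySem.Chars.isalpha c then 1 else 0)) (0 : Int)
      = ((pvVal S : Nat) : Int) := pvAlt_fold_eq cs 0
  have hSbits := pvMap_bits cs
  rw [hfold, hE]
  by_cases hneg : pattern < 0
  · -- binary keeps the 'b' from '-0b…'; it never equals the all-bit string S, and pattern < 0 ≤ E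
    rw [if_pos hneg]
    have hbmem : ∀ bin : List Char, 'b' ∈ bin → (bin == S) = false := by
      intro bin hb
      rw [beq_eq_false_iff_ne]
      intro h; subst h
      rcases hSbits 'b' hb with h | h <;> exact absurd h (by decide)
    have hb2 : ∀ k : Nat, ∀ tl : List Char,
        (List.replicate k '0' ++ 'b' :: tl == S) = false := by
      intro k tl; exact hbmem _ (by simp)
    have hEb : (pattern == ((pvVal S : Nat) : Int)) = false := by
      rw [beq_eq_false_iff_ne]; intro h; omega
    rw [PySem.List.slice_from _ (by norm_num)]
    simp only [show (2:Int).toNat = 2 from rfl, List.drop_succ_cons, List.drop_zero]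
    rw [hEb]
    split
    · exfalso; omega
    · split
      · exact hb2 _ _
      · exact hbmem _ (by simp)
  · -- pattern = m ≥ 0; digits represent m
    rw [if_neg hneg]
    replace hneg : 0 ≤ pattern := by omega
    set m := pattern.natAbs with hm
    have hpm : pattern = (m : Int) := by omega
    set D0 : List Char := if m = 0 then ['0'] else pvBinDigits m with hD0
    have hval : pvVal D0 = m := by
      rw [hD0]; split
      · simp [pvVal]; omega
      · exact pvBinDigits_val m
    have hbits : ∀ c ∈ D0, pvIsBit c := by
      rw [hD0]; split
      · intro c hc; simp only [List.mem_singleton] at hc; subst hc; left; rfl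
      · exact pvBinDigits_bits m
    have hltD : m < 2 ^ D0.length := by
      rw [hD0]; split
      · simpa using by omega
      · exact pvBinDigits_lt m
    rw [PySem.List.slice_from _ (by norm_num)]
    simp only [show (2:Int).toNat = 2 from rfl, List.drop_succ_cons, List.drop_zero]
    rw [hpm]
    by_cases hlt : D0.length < cs.length
    · -- padded case: both sides length cs.length, compare values
      rw [if_pos hlt]
      have hlen : (List.replicate (cs.length - D0.length) '0' ++ D0).length = S.length := by
        simp [hSlen]; omega
      have hpbits : ∀ c ∈ List.replicate (cs.length - D0.length) '0' ++ D0, pvIsBit c := by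
        intro c hc
        rcases List.mem_append.mp hc with h | h
        · left; exact List.eq_of_mem_replicate h
        · exact hbits c h
      have hpval : pvVal (List.replicate (cs.length - D0.length) '0' ++ D0) = m := by
        rw [pvVal_replicate_append, hval]
      by_cases he : m = pvVal S
      · rw [beq_iff_eq.mpr (pvVal_inj _ _ hlen hpbits hSbits (by rw [hpval, he]))]
        symm; rw [beq_iff_eq]; exact_mod_cast he
      · have h1 : (List.replicate (cs.length - D0.length) '0' ++ D0 == S) = false := by
          rw [beq_eq_false_iff_ne]
          intro h; exact he (by rw [← hpval, h])
        have h2 : (((m : Nat) : Int) == ((pvVal S : Nat) : Int)) = false := by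
          rw [beq_eq_false_iff_ne]; intro h; exact he (by exact_mod_cast h)
        rw [h1, h2]
    · rw [if_neg hlt]
      replace hlt : cs.length ≤ D0.length := by omega
      by_cases heq : D0.length = cs.length
      · -- equal lengths: string equality iff value equality
        by_cases he : m = pvVal S
        · rw [beq_iff_eq.mpr (pvVal_inj _ _ (by rw [heq, hSlen]) hbits hSbits (by rw [hval, he]))]
          symm; rw [beq_iff_eq]; exact_mod_cast he
        · have h1 : (D0 == S) = false := by
            rw [beq_eq_false_iff_ne]; intro h; exact he (by rw [← hval, h])
          have h2 : (((m : Nat) : Int) == ((pvVal S : Nat) : Int)) = false := by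
            rw [beq_eq_false_iff_ne]; intro h; exact he (by exact_mod_cast h)
          rw [h1, h2]
      · -- D0 strictly longer than the command: lengths differ, and m ≥ 2^cs.length > pvVal S
        have hgt : cs.length < D0.length := by omega
        have h1 : (D0 == S) = false := by
          rw [beq_eq_false_iff_ne]
          intro h
          rw [h, hSlen] at hgt
          omega
        have hm0 : m ≠ 0 := by
          intro h0
          rw [hD0, if_pos h0] at hgt
          simp only [List.length_singleton] at hgt
          have hcs0 : cs.length = 0 := by omega
          exact hnD ⟨by omega, String.toList_eq_nil_iff.mp (by
            rw [← hcs]; exact List.length_eq_zero_iff.mp hcs0)⟩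
        have hge : 2 ^ (D0.length - 1) ≤ m := by
          rw [hD0, if_neg hm0]
          exact pvBinDigits_ge m (by omega)
        have hSval : pvVal S < 2 ^ cs.length := by
          have := pvVal_lt S
          rwa [hSlen] at this
        have h2 : (((m : Nat) : Int) == ((pvVal S : Nat) : Int)) = false := by
          rw [beq_eq_false_iff_ne]
          have : 2 ^ cs.length ≤ 2 ^ (D0.length - 1) :=
            Nat.pow_le_pow_right (by omega) (by omega)
          intro h
          have : m = pvVal S := by exact_mod_cast h
          omega
        rw [h1, h2]

theorem check_command_changed : Claim_changed_check_command := by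
  unfold Claim_changed_check_command; decide

theorem check_command_tight : Claim_exact_check_command := by
  intro pattern command _ hD
  obtain ⟨hp, hc⟩ := hD
  subst hp; subst hc
  decide
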